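-- pv_equiv track=rewrite | github.com/devmariliafeitosa/Cybersecurity_Fundamentals | Lab03_Cripto/funcoes_cripto.py | decifrar_texto
-- ===== SOURCE A (Python) =====
-- def decifrar_texto(texto_cifrado, chave_aleatoria):
--     texto_original = ""
--
--     for caractere in texto_cifrado:
--         binario_invertido = bin(ord(caractere))[2:].zfill(8)
--         binario_original = ""
--         for bit in binario_invertido:
--             if bit == '1':
--                 binario_original += '0'
--             else:
--                 binario_original += '1'
--         decimal = int(binario_original, 2) - chave_aleatoria
--         texto_original += chr(decimal)
--
--     return texto_original
-- ===== SOURCE B (Python) =====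
-- def decifrar_texto(texto_cifrado, chave_aleatoria):
--     res = []
--     for c in texto_cifrado:
--         n = ord(c)
--         inverted = (1 << max(8, n.bit_length())) - 1 - n
--         res.append(chr(inverted - chave_aleatoria))
--     return "".join(res)
-- ===== Notes on version B (the rewrite author's own statement) =====
-- stated objective: simpler
-- what changed: Replaces the per-bit string-building inner loop and the bin()/zfill/int(...,2) round-trip with a closed-form arithmetic inversion (1 << max(8, n.bit_length())) - 1 - n per character, accumulated via a list and join.
import Mathlib
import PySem

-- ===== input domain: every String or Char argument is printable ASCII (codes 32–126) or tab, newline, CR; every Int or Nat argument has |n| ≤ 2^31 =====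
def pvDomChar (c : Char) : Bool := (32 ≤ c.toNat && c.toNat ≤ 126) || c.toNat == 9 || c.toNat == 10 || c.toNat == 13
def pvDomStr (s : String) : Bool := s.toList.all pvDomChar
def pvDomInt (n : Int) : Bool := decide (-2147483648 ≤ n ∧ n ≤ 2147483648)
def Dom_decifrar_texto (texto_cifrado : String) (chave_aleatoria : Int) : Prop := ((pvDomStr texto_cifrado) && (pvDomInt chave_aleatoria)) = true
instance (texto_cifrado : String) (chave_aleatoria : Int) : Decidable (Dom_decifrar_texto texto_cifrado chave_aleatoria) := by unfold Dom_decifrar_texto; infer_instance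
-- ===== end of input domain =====

-- B replaces A's per-bit string-building loop and bin()/zfill/int(...,2) round-trip by a
-- closed-form arithmetic bit inversion per character (simpler; same single pass).


-- ===== PORT A =====
-- chr(decimal) is ported as Char.ofNat decimal.toNat (exact under Pre_, where chr is defined
-- and the result is a valid non-surrogate codepoint); int(s, 2) via PySem.Int.ofCharsBase?,
-- which is always `some` here (nonempty string of '0'/'1').
def decifrar_texto_step (chave_aleatoria : Int) (acc : List Char) (caractere : Char) : List Char :=
  let binario_invertido := PySem.Chars.zfill ((PySem.Int.toBinChars0b ((caractere.toNat : Int))).drop 2) 8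
  let binario_original := binario_invertido.foldl (fun b bit => b ++ [if bit = '1' then '0' else '1']) ([] : List Char)
  let decimal := (PySem.Int.ofCharsBase? binario_original 2).getD 0 - chave_aleatoria
  acc ++ [Char.ofNat decimal.toNat]

def decifrar_texto (texto_cifrado : String) (chave_aleatoria : Int) : String :=
  String.ofList (texto_cifrado.toList.foldl (decifrar_texto_step chave_aleatoria) [])

-- ===== PORT B =====
-- 1 << L ported as 2 ^ L; chr as Char.ofNat (exact under Pre_, as above).
def decifrar_texto_alt_step (chave_aleatoria : Int) (acc : List Char) (c : Char) : List Char :=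
  let n : Int := (c.toNat : Int)
  let inverted := (2 : Int) ^ (max 8 (PySem.Int.bitLength n)) - 1 - n
  acc ++ [Char.ofNat (inverted - chave_aleatoria).toNat]

def decifrar_texto_alt (texto_cifrado : String) (chave_aleatoria : Int) : String :=
  String.ofList (texto_cifrado.toList.foldl (decifrar_texto_alt_step chave_aleatoria) [])

-- ===== PRECONDITION & SPEC =====
-- Pre_ excludes exactly (i) inputs where chr() raises ValueError (the decrypted code point
-- 2^max(8, bitlen(ord c)) - 1 - ord c - chave is outside [0, 0x110000)) and (ii) inputs where
-- A returns a string with a lone surrogate, a Python str value Lean's Char/String cannot represent.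
def Pre_decifrar_texto (texto_cifrado : String) (chave_aleatoria : Int) : Prop :=
  (texto_cifrado.toList.all fun c =>
    let v : Int := (2 : Int) ^ (max 8 (PySem.Int.bitLength (c.toNat : Int))) - 1 - (c.toNat : Int) - chave_aleatoria
    decide (0 ≤ v) &&
    (decide (v < 55296) || (decide (57344 ≤ v) && decide (v < 1114112)))) = true
instance (texto_cifrado : String) (chave_aleatoria : Int) : Decidable (Pre_decifrar_texto texto_cifrado chave_aleatoria) := by unfold Pre_decifrar_texto; infer_instance

def pvWitness_decifrar_texto : String × Int := ("AB", 100)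

def Spec_decifrar_texto (texto_cifrado : String) (chave_aleatoria : Int) (out : String) : Prop := out = decifrar_texto_alt texto_cifrado chave_aleatoria
instance (texto_cifrado : String) (chave_aleatoria : Int) (out : String) : Decidable (Spec_decifrar_texto texto_cifrado chave_aleatoria out) := by unfold Spec_decifrar_texto; infer_instance

-- ===== CLAIM (what is proved, stated in full; the proofs are below) =====
def Claim_equal_decifrar_texto : Prop := ∀ (texto_cifrado : String) (chave_aleatoria : Int), Dom_decifrar_texto texto_cifrado chave_aleatoria → Pre_decifrar_texto texto_cifrado chave_aleatoria → Spec_decifrar_texto texto_cifrado chave_aleatoria (decifrar_texto texto_cifrado chave_aleatoria)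

-- ===== LEMMAS AND PROOFS =====

-- A's per-char decrypted value, as a function of the code point n (before key subtraction).
def pvAval (n : Nat) : Int :=
  (PySem.Int.ofCharsBase?
    ((PySem.Chars.zfill ((PySem.Int.toBinChars0b ((n : Int))).drop 2) 8).foldl
      (fun b bit => b ++ [if bit = '1' then '0' else '1']) ([] : List Char)) 2).getD 0

-- B's per-char inverted value as a function of n.
def pvBval (n : Nat) : Int :=
  (2 : Int) ^ (max 8 (PySem.Int.bitLength (n : Int))) - 1 - (n : Int)

theorem pvAval_eq_pvBval_small : ∀ n : Fin 127, pvAval n.val = pvBval n.val := by decide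

theorem pv_step_eq (c : Char) (k : Int) (h : pvDomChar c = true) :
    pvAval c.toNat - k = pvBval c.toNat - k := by
  have hle : c.toNat < 127 := by
    simp [pvDomChar] at h
    omega
  have := pvAval_eq_pvBval_small ⟨c.toNat, hle⟩
  simp at this
  omega

theorem pv_step_fold_eq (k : Int) (acc : List Char) (c : Char) (h : pvDomChar c = true) :
    decifrar_texto_step k acc c = decifrar_texto_alt_step k acc c := by
  have hc := pv_step_eq c k h
  simp only [pvAval, pvBval] at hc
  simp only [decifrar_texto_step, decifrar_texto_alt_step]
  rw [hc]

theorem pv_fold_eq (k : Int) (l : List Char) (h : l.all pvDomChar = true) (acc : List Char) :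
    l.foldl (decifrar_texto_step k) acc = l.foldl (decifrar_texto_alt_step k) acc := by
  induction l generalizing acc with
  | nil => rfl
  | cons c l ih =>
    simp only [List.all_cons, Bool.and_eq_true] at h
    simp only [List.foldl_cons]
    rw [pv_step_fold_eq k acc c h.1, ih h.2]

-- ===== VERDICT (by name: the statement is the Claim_ definition above) =====
theorem decifrar_texto_spec : Claim_equal_decifrar_texto := by
  intro texto k hdom _
  unfold Spec_decifrar_texto decifrar_texto decifrar_texto_alt
  have h : texto.toList.all pvDomChar = true := by
    unfold Dom_decifrar_texto pvDomStr at hdom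
    exact (Bool.and_eq_true _ _ |>.mp hdom).1
  rw [pv_fold_eq k texto.toList h []]
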